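-- pv_equiv track=rewrite | github.com/MarsAlien1ie/Card-Thing | Card-Thing-copy/my-server/image_model/final_main.py | parse_ocr_result
-- ===== SOURCE A (Python) =====
-- def parse_ocr_result(text):
--     words = text.split()
--     estimated_name = text
--     estimated_number = ""
--     for i, word in enumerate(reversed(words)):
--         clean_word = ''.join(c for c in word if c.isalnum() or c in '/')
--         if any(char.isdigit() for char in clean_word):
--             estimated_number = clean_word
--             estimated_name = " ".join(words[:-(i+1)])
--             break
--     return estimated_name, estimated_number
-- ===== SOURCE B (Python) =====
-- def parse_ocr_result(text):
--     # Single streaming pass over the raw characters: a tokenizer state machine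
--     # that, at each token boundary, records (name-so-far, cleaned token) whenever
--     # the finished token contained a digit. No split(), no word list, no slicing.
--     name, number = text, ""
--     joined = ""          # tokens completed so far, single-space joined
--     cur = []             # characters of the token being read
--     has_digit = False
--     for c in text:
--         if c.isspace():
--             if cur:
--                 token = ''.join(cur)
--                 if has_digit:
--                     number = ''.join(ch for ch in token if ch.isalnum() or ch == '/')
--                     name = joined
--                 joined = joined + " " + token if joined else token
--                 cur = []
--                 has_digit = False
--         else:
--             cur.append(c)
--             if c.isdigit():
--                 has_digit = True
--     if cur and has_digit:
--         token = ''.join(cur)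
--         number = ''.join(ch for ch in token if ch.isalnum() or ch == '/')
--         name = joined
--     return name, number
-- ===== Notes on version B (the rewrite author's own statement) =====
-- stated objective: alternative
-- what changed: Replaces A's split()/reversed()/enumerate/slice pipeline by a single streaming character-level tokenizer state machine that never builds a word list: it scans the raw characters once, and at each token boundary where the finished token contained a digit it records the space-joined prefix as the name and the cleaned token as the number, keeping the last such record.
import Mathlib
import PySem

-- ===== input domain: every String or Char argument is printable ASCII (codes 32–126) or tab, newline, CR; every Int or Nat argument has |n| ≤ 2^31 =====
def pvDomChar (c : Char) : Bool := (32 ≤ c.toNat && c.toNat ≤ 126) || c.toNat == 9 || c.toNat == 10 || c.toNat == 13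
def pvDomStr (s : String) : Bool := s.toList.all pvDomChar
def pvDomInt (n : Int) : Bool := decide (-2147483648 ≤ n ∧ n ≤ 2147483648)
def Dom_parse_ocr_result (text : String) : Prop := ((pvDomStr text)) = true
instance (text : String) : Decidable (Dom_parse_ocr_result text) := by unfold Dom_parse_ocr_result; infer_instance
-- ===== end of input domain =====

-- B replaces A's split/reversed-scan pipeline by a single streaming character-level
-- tokenizer state machine (no split(), no word list, no slicing); objective: alternative.

-- ===== PORT A =====
def pvCleanA (w : String) : String :=
  String.ofList (w.toList.filter (fun c => PySem.Chars.isalnum c || decide (c = '/')))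
def pvLoopA (text : String) (words : List String) (rev : List String) (i : Nat) : String × String :=
  match rev with
  | [] => (text, "")
  | w :: rest =>
    let cw := pvCleanA w
    if cw.toList.any PySem.Chars.isdigit then
      (PySem.Str.join " " (PySem.List.slice words none (some (-((i : Int) + 1)))), cw)
    else pvLoopA text words rest (i + 1)

def parse_ocr_result (text : String) : String × String :=
  pvLoopA text (PySem.Str.split₀ text) (PySem.Str.split₀ text).reverse 0

-- ===== PORT B =====
def pvCleanPred (c : Char) : Bool := PySem.Chars.isalnum c || decide (c = '/')

-- one step of Source B's loop body; state = (name, number, joined, cur, has_digit)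
def pvStepB : (String × String × List Char × List Char × Bool) → Char →
    (String × String × List Char × List Char × Bool)
  | (name, number, joined, cur, hd), c =>
    if PySem.Chars.isspace c then
      if cur.isEmpty then (name, number, joined, cur, hd)
      else
        ((if hd then String.ofList joined else name),
         (if hd then String.ofList (cur.filter pvCleanPred) else number),
         (if joined.isEmpty then cur else joined ++ ' ' :: cur),
         ([] : List Char), false)
    else (name, number, joined, cur ++ [c], hd || PySem.Chars.isdigit c)

-- Source B's trailing 'if cur and has_digit' finalization
def pvFinishB : (String × String × List Char × List Char × Bool) → String × String
  | (name, number, joined, cur, hd) =>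
    if !cur.isEmpty && hd then (String.ofList joined, String.ofList (cur.filter pvCleanPred))
    else (name, number)

def parse_ocr_result_alt (text : String) : String × String :=
  pvFinishB (text.toList.foldl pvStepB (text, "", ([] : List Char), ([] : List Char), false))

-- ===== PRECONDITION & SPEC =====
def Spec_parse_ocr_result (text : String) (out : String × String) : Prop := out = parse_ocr_result_alt text
instance (text : String) (out : String × String) : Decidable (Spec_parse_ocr_result text out) := by unfold Spec_parse_ocr_result; infer_instance

-- ===== CLAIM (what is proved, stated in full; the proofs are below) =====
def Claim_equal_parse_ocr_result : Prop := ∀ (text : String), Dom_parse_ocr_result text → Spec_parse_ocr_result text (parse_ocr_result text)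

-- ===== LEMMAS AND PROOFS =====

-- forward-buffer tokenizer equivalent to PySem.Chars.split₀
def pvTk : List Char → List Char → List (List Char)
  | [], cur => if cur.isEmpty then [] else [cur]
  | c :: rest, cur =>
    if PySem.Chars.isspace c then
      if cur.isEmpty then pvTk rest [] else cur :: pvTk rest []
    else pvTk rest (cur ++ [c])

-- token-level reading of B's machine
def pvTok (name number : String) (joined : List Char) : List (List Char) → String × String
  | [] => (name, number)
  | t :: rest =>
    pvTok (if t.any PySem.Chars.isdigit then String.ofList joined else name)
          (if t.any PySem.Chars.isdigit then String.ofList (t.filter pvCleanPred) else number)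
          (if joined.isEmpty then t else joined ++ ' ' :: t) rest

def pvFJ (j : List Char) (ts : List (List Char)) : List Char :=
  ts.foldl (fun j t => if j.isEmpty then t else j ++ ' ' :: t) j

lemma go_eq_tk : ∀ (cs cur : List Char) (rest : List (List Char)),
    PySem.Chars.split₀.go cs cur rest = rest.reverse ++ pvTk cs cur.reverse := by
  intro cs
  induction cs with
  | nil =>
    intro cur rest
    simp only [PySem.Chars.split₀.go, pvTk, List.isEmpty_reverse]
    split <;> simp
  | cons c cs ih =>
    intro cur rest
    simp only [PySem.Chars.split₀.go, pvTk, List.isEmpty_reverse]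
    by_cases hs : PySem.Chars.isspace c = true
    · simp only [hs, if_true]
      by_cases he : cur.isEmpty = true
      · simpa [he] using ih [] rest
      · simp only [he, if_neg, Bool.false_eq_true, not_false_iff]
        rw [ih [] (cur.reverse :: rest)]
        simp
    · simp only [hs, if_neg, Bool.false_eq_true, not_false_iff]
      rw [ih (c :: cur) rest]
      simp

lemma split₀_eq_tk (cs : List Char) : PySem.Chars.split₀ cs = pvTk cs [] := by
  rw [PySem.Chars.split₀, go_eq_tk cs [] []]
  rfl

lemma tk_ne_nil : ∀ (cs cur : List Char) (t : List Char), t ∈ pvTk cs cur → t ≠ [] := by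
  intro cs
  induction cs with
  | nil =>
    intro cur t ht
    simp only [pvTk] at ht
    split at ht
    · simp at ht
    · next he =>
      rw [List.mem_singleton] at ht
      subst ht
      simpa [List.isEmpty_iff] using he
  | cons c cs ih =>
    intro cur t ht
    simp only [pvTk] at ht
    split at ht
    · split at ht
      · exact ih [] t ht
      · next he =>
        rcases List.mem_cons.mp ht with rfl | h
        · simpa [List.isEmpty_iff] using he
        · exact ih [] t h
    · exact ih (cur ++ [c]) t ht

-- B's character fold computes the token-level recursion over pvTk's tokens
lemma foldB_eq_tok : ∀ (cs : List Char) (n m : String) (j cur : List Char),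
    pvFinishB (cs.foldl pvStepB (n, m, j, cur, cur.any PySem.Chars.isdigit)) =
      pvTok n m j (pvTk cs cur) := by
  intro cs
  induction cs with
  | nil =>
    intro n m j cur
    simp only [List.foldl_nil, pvFinishB, pvTk]
    by_cases he : cur.isEmpty = true
    · simp [he, pvTok]
    · simp only [he, if_neg, Bool.false_eq_true, not_false_iff, Bool.not_false, Bool.true_and]
      by_cases hd : cur.any PySem.Chars.isdigit = true <;> simp [hd, pvTok]
  | cons c cs ih =>
    intro n m j cur
    simp only [List.foldl_cons, pvStepB, pvTk]
    by_cases hs : PySem.Chars.isspace c = true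
    · simp only [hs, if_true]
      by_cases he : cur.isEmpty = true
      · rw [List.isEmpty_iff] at he
        subst he
        simpa using ih n m j []
      · simp only [he, if_neg, Bool.false_eq_true, not_false_iff]
        have := ih (if cur.any PySem.Chars.isdigit then String.ofList j else n)
          (if cur.any PySem.Chars.isdigit then String.ofList (cur.filter pvCleanPred) else m)
          (if j.isEmpty then cur else j ++ ' ' :: cur) []
        simp only [List.any_nil] at this
        rw [this, pvTok]
    · simp only [hs, if_neg, Bool.false_eq_true, not_false_iff]
      have hany : (cur ++ [c]).any PySem.Chars.isdigit =
          (cur.any PySem.Chars.isdigit || PySem.Chars.isdigit c) := by simp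
      rw [← hany]
      exact ih n m j (cur ++ [c])

lemma join_append_left (a b : List Char) (ts : List (List Char)) :
    PySem.Chars.join [' '] ((a ++ b) :: ts) = a ++ PySem.Chars.join [' '] (b :: ts) := by
  cases ts with
  | nil => simp [PySem.Chars.join_singleton]
  | cons u us => simp [PySem.Chars.join_cons_cons]

lemma fj_eq_join : ∀ (ts : List (List Char)) (j : List Char), j ≠ [] →
    pvFJ j ts = PySem.Chars.join [' '] (j :: ts) := by
  intro ts
  induction ts with
  | nil => intro j hj; simp [pvFJ, PySem.Chars.join_singleton]
  | cons t ts ih =>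
    intro j hj
    have hje : j.isEmpty = false := by simpa [List.isEmpty_iff] using hj
    simp only [pvFJ, List.foldl_cons, hje, Bool.false_eq_true, if_neg, not_false_iff]
    have hrec := ih (j ++ ' ' :: t) (by simp)
    simp only [pvFJ] at hrec
    rw [hrec]
    rw [show j ++ ' ' :: t = (j ++ [' ']) ++ t by simp, join_append_left]
    cases ts with
    | nil => simp [PySem.Chars.join_cons_cons, PySem.Chars.join_singleton]
    | cons u us => simp [PySem.Chars.join_cons_cons]

lemma fj_eq_strjoin (ts : List (List Char)) (hne : ∀ t ∈ ts, t ≠ []) :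
    String.ofList (pvFJ [] ts) = PySem.Str.join " " (ts.map String.ofList) := by
  cases ts with
  | nil => rfl
  | cons t rest =>
    have ht : t ≠ [] := hne t (by simp)
    have hmap : List.map String.toList (List.map String.ofList (t :: rest)) = t :: rest := by
      simp [List.map_map, Function.comp_def]
    have : pvFJ [] (t :: rest) = pvFJ t rest := by simp [pvFJ]
    rw [this, fj_eq_join rest t ht, PySem.Str.join, hmap]
    rfl

lemma tok_drop_nondigit (t : List Char) (hd : ¬ t.any PySem.Chars.isdigit = true) :
    ∀ (ts : List (List Char)) (n m : String) (j : List Char),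
      pvTok n m j (ts ++ [t]) = pvTok n m j ts := by
  intro ts
  induction ts with
  | nil => intro n m j; simp [pvTok, hd]
  | cons s ts ih => intro n m j; simp only [List.cons_append, pvTok]; exact ih _ _ _

lemma tok_last_digit (t : List Char) (hd : t.any PySem.Chars.isdigit = true) :
    ∀ (ts : List (List Char)) (n m : String) (j : List Char),
      pvTok n m j (ts ++ [t]) =
        (String.ofList (pvFJ j ts), String.ofList (t.filter pvCleanPred)) := by
  intro ts
  induction ts with
  | nil => intro n m j; simp [pvTok, hd, pvFJ]
  | cons s ts ih =>
    intro n m j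
    simp only [List.cons_append, pvTok]
    rw [ih]
    rfl

lemma clean_any_digit (w : String) :
    (pvCleanA w).toList.any PySem.Chars.isdigit = w.toList.any PySem.Chars.isdigit := by
  rw [pvCleanA, String.toList_ofList, List.any_filter]
  induction w.toList with
  | nil => rfl
  | cons c cs ih =>
    simp only [List.any_cons, ih]
    by_cases h : PySem.Chars.isdigit c = true <;> simp [h, PySem.Chars.isalnum]

lemma loopA_shift (text : String) (ws : List String) (w : String) :
    ∀ (rev : List String) (i : Nat),
      pvLoopA text (ws ++ [w]) rev (i + 1) = pvLoopA text ws rev i := by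
  intro rev
  induction rev with
  | nil => intro i; rfl
  | cons w' rest ih =>
    intro i
    simp only [pvLoopA]
    split
    · have e1 : (-(((i + 1 : Nat) : Int) + 1)) = -(((i + 2 : Nat) : Int)) := by push_cast; ring
      have e2 : (-((i : Int) + 1)) = -(((i + 1 : Nat) : Int)) := by push_cast; ring
      rw [e1, e2, PySem.List.slice_to_neg_natCast _ _ (by omega),
        PySem.List.slice_to_neg_natCast _ _ (by omega)]
      have e3 : (ws ++ [w]).length - (i + 2) = ws.length - (i + 1) := by simp
      rw [e3, List.take_append_of_le_length (Nat.sub_le _ _)]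
    · exact ih (i + 1)

-- A's reverse scan over any nonempty-token list equals B's token-level recursion
lemma loopA_eq_tok (text : String) :
    ∀ (ts : List (List Char)), (∀ t ∈ ts, t ≠ []) →
      pvLoopA text (ts.map String.ofList) (ts.map String.ofList).reverse 0 =
        pvTok text "" [] ts := by
  intro ts
  induction ts using List.reverseRecOn with
  | nil => intro _; rfl
  | append_singleton ts t ih =>
    intro hne
    rw [List.map_append, List.map_singleton, List.reverse_append, List.reverse_singleton,
      List.singleton_append]
    have hclean : pvCleanA (String.ofList t) = String.ofList (t.filter pvCleanPred) := by
      rw [pvCleanA, String.toList_ofList]; rfl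
    by_cases h : t.any PySem.Chars.isdigit = true
    · -- last token has a digit: A breaks at once, B's token recursion records it last
      have hdig : (pvCleanA (String.ofList t)).toList.any PySem.Chars.isdigit = true := by
        rw [clean_any_digit, String.toList_ofList]; exact h
      simp only [pvLoopA, hdig, if_pos]
      rw [tok_last_digit t h]
      have e1 : (-(((0 : Nat) : Int) + 1)) = (-1 : Int) := by norm_num
      rw [e1, PySem.List.slice_to_neg_one, List.dropLast_concat, hclean,
        fj_eq_strjoin ts (fun t ht => hne t (by simp [ht]))]
    · -- last token digit-free: A skips it, B's recursion ignores it too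
      have hdig : (pvCleanA (String.ofList t)).toList.any PySem.Chars.isdigit = false := by
        rw [clean_any_digit, String.toList_ofList]; simpa using h
      simp only [pvLoopA, hdig, Bool.false_eq_true, if_neg, not_false_iff]
      rw [show (1 : Nat) = 0 + 1 from rfl, loopA_shift, tok_drop_nondigit t h,
        ih (fun t ht => hne t (by simp [ht]))]

-- ===== VERDICT (by name: the statement is the Claim_ definition above) =====
theorem parse_ocr_result_spec : Claim_equal_parse_ocr_result := by
  intro text _
  show parse_ocr_result text = parse_ocr_result_alt text
  rw [parse_ocr_result, parse_ocr_result_alt,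
    show ((text, "", ([] : List Char), ([] : List Char), false) =
      (text, "", ([] : List Char), ([] : List Char),
        ([] : List Char).any PySem.Chars.isdigit)) from rfl,
    foldB_eq_tok, PySem.Str.split₀, split₀_eq_tk]
  exact loopA_eq_tok text (pvTk text.toList []) (tk_ne_nil text.toList [])
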